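-- pv_equiv track=rewrite | github.com/phrugsa-limbunlom/algop | string_handle.py | find_frequent_letter_and_digit
-- ===== SOURCE A (Python) =====
-- def find_frequent_letter_and_digit(word: str) -> list:
--     """
--     Finds the most frequent letters and digits in a string.
--
--     Parameters:
--     word (str): The input string to analyze
--
--     Returns:
--     list: List of characters that appear most frequently in the input
--     """
--     word = word.upper()
--     word_frequency = dict()
--
--     for w in word:
--         if w.isdigit() or w.isalpha():
--             if w not in word_frequency:
--                 word_frequency[w] = 1
--             else:
--                 word_frequency[w] = word_frequency[w] + 1
--
--     word_maximum_frequency = [word[0] for word in word_frequency.items() if word[1] == max(word_frequency.values())]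
--
--     return word_maximum_frequency
-- ===== SOURCE B (Python) =====
-- def find_frequent_letter_and_digit(word: str) -> list:
--     word = word.upper()
--     freq = {}
--     for w in word:
--         if w.isdigit() or w.isalpha():
--             freq[w] = freq.get(w, 0) + 1
--     buckets = {}
--     best = 0
--     for ch, cnt in freq.items():
--         buckets.setdefault(cnt, []).append(ch)
--         if cnt > best:
--             best = cnt
--     return buckets.get(best, [])
-- ===== Notes on version B (the rewrite author's own statement) =====
-- stated objective: alternative
-- what changed: The second phase no longer filters items against max(values) recomputed per element: one pass over the frequency items buckets characters by their count while tracking the running maximum, and the answer is the bucket stored under that maximum (or [] when empty); the counting pass uses dict.get instead of A's membership if/else.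
import Mathlib
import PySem

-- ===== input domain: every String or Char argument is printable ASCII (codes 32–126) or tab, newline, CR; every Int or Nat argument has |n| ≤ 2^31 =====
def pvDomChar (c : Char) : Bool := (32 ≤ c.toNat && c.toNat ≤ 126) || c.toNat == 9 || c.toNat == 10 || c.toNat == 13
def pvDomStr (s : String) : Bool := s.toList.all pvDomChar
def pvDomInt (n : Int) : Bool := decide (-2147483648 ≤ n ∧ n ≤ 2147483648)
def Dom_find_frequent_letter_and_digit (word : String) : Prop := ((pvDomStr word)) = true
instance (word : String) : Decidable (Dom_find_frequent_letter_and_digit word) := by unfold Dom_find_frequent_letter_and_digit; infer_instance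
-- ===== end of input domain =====

-- B replaces A's per-item max-rescanning filter by a single pass that buckets characters by
-- their count while tracking the running maximum count (objective: alternative decomposition).

-- ===== PORT A =====
-- literal transliteration of A: count filtered chars, then keep items whose count equals max(values)
def find_frequent_letter_and_digit (word : String) : List String :=
  let wl : List Char := PySem.Chars.upper word.toList
  let freq : PySem.Dict String Int := wl.foldl (fun d w =>
      if (PySem.Chars.isdigit w || PySem.Chars.isalpha w) then
        if d.contains (String.ofList [w]) = false then d.insert (String.ofList [w]) 1
        else d.insert (String.ofList [w]) (d.getD (String.ofList [w]) 0 + 1)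
      else d) PySem.Dict.empty
  (freq.items.filter (fun p =>
      PySem.List.max? freq.values (fun v => v) == some p.2)).map (fun p => p.1)

-- ===== PORT B =====
-- literal transliteration of B: same counting pass (get-based), then one pass building
-- count→chars buckets while tracking the best count; answer is buckets.get(best, [])
def find_frequent_letter_and_digit_alt (word : String) : List String :=
  let wl : List Char := PySem.Chars.upper word.toList
  let freq : PySem.Dict String Int := wl.foldl (fun d w =>
      if (PySem.Chars.isdigit w || PySem.Chars.isalpha w) then
        d.insert (String.ofList [w]) (d.getD (String.ofList [w]) 0 + 1)
      else d) PySem.Dict.empty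
  let st := freq.items.foldl
      (fun (st : PySem.Dict Int (List String) × Int) p =>
        (st.1.modify p.2 [] (fun l => l ++ [p.1]), if p.2 > st.2 then p.2 else st.2))
      (PySem.Dict.empty, 0)
  st.1.getD st.2 []

-- ===== PRECONDITION & SPEC =====
def Spec_find_frequent_letter_and_digit (word : String) (out : List String) : Prop := out = find_frequent_letter_and_digit_alt word
instance (word : String) (out : List String) : Decidable (Spec_find_frequent_letter_and_digit word out) := by unfold Spec_find_frequent_letter_and_digit; infer_instance

-- ===== CLAIM (what is proved, stated in full; the proofs are below) =====
def Claim_equal_find_frequent_letter_and_digit : Prop := ∀ (word : String), Dom_find_frequent_letter_and_digit word → Spec_find_frequent_letter_and_digit word (find_frequent_letter_and_digit word)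

-- ===== LEMMAS AND PROOFS =====

-- A's if/else counting step equals B's get-based counting step, so the two folds agree.
lemma pv_count_eq (l : List Char) (d : PySem.Dict String Int) :
    l.foldl (fun d w =>
      if (PySem.Chars.isdigit w || PySem.Chars.isalpha w) then
        if d.contains (String.ofList [w]) = false then d.insert (String.ofList [w]) 1
        else d.insert (String.ofList [w]) (d.getD (String.ofList [w]) 0 + 1)
      else d) d
    = l.foldl (fun d w =>
      if (PySem.Chars.isdigit w || PySem.Chars.isalpha w) then
        d.insert (String.ofList [w]) (d.getD (String.ofList [w]) 0 + 1)
      else d) d := by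
  have h : (fun (d : PySem.Dict String Int) (w : Char) =>
      if (PySem.Chars.isdigit w || PySem.Chars.isalpha w) then
        if d.contains (String.ofList [w]) = false then d.insert (String.ofList [w]) 1
        else d.insert (String.ofList [w]) (d.getD (String.ofList [w]) 0 + 1)
      else d)
      = (fun (d : PySem.Dict String Int) (w : Char) =>
      if (PySem.Chars.isdigit w || PySem.Chars.isalpha w) then
        d.insert (String.ofList [w]) (d.getD (String.ofList [w]) 0 + 1)
      else d) := by
    funext d w
    by_cases hf : (PySem.Chars.isdigit w || PySem.Chars.isalpha w) = true
    · by_cases hc : d.contains (String.ofList [w]) = false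
      · simp [hf, hc, PySem.Dict.getD_of_not_contains d 0 hc]
      · simp [hf, hc]
    · simp [hf]
  rw [h]

-- every value produced by the counting fold is at least 1
lemma pv_values_pos (l : List Char) (d : PySem.Dict String Int)
    (hd : ∀ v ∈ d.values, 1 ≤ v) :
    ∀ v ∈ (l.foldl (fun d w =>
      if (PySem.Chars.isdigit w || PySem.Chars.isalpha w) then
        d.insert (String.ofList [w]) (d.getD (String.ofList [w]) 0 + 1)
      else d) d).values, 1 ≤ v := by
  induction l generalizing d with
  | nil => exact hd
  | cons w t ih =>
    simp only [List.foldl_cons]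
    apply ih
    by_cases hf : (PySem.Chars.isdigit w || PySem.Chars.isalpha w) = true
    · simp only [hf, if_true]
      intro v hv
      rcases PySem.Dict.mem_values_insert d (String.ofList [w]) _ v hv with h | h
      · have h0 : 0 ≤ d.getD (String.ofList [w]) 0 := by
          rw [PySem.Dict.getD_eq_get?_getD]
          cases hg : d.get? (String.ofList [w]) with
          | none => simp
          | some v' =>
            have hm : (String.ofList [w], v') ∈ d.items := PySem.Dict.mem_items_of_get?_eq_some d hg
            have hv' : v' ∈ d.values := by
              simp only [PySem.Dict.values]
              exact List.mem_map.mpr ⟨_, hm, rfl⟩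
            have := hd v' hv'
            simp
            omega
        omega
      · exact hd v h
    · simp only [hf, Bool.false_eq_true, if_false]
      exact hd
  
-- the running-best loop is a fold of max over the counts
lemma pv_best_eq_max (l : List (String × Int)) (b : Int) :
    l.foldl (fun b (p : String × Int) => if p.2 > b then p.2 else b) b
    = (l.map (fun p => p.2)).foldl max b := by
  induction l generalizing b with
  | nil => rfl
  | cons p t ih =>
    simp only [List.foldl_cons, List.map_cons]
    rw [ih]
    congr 1
    rw [max_def]
    split_ifs <;> omega

-- the bucket fold's entry at c is exactly the keys whose count is c, in item order
lemma pv_bucket_eq (l : List (String × Int)) (c : Int) :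
    (l.foldl (fun (b : PySem.Dict Int (List String)) p =>
        b.modify p.2 [] (fun l => l ++ [p.1])) PySem.Dict.empty).getD c []
    = (l.filter (fun p => p.2 == c)).map (fun p => p.1) := by
  have h := PySem.Dict.getD_foldl_modify_append
      (l := l.map (fun p => (p.2, p.1))) (d := PySem.Dict.empty) (c := c)
  rw [List.foldl_map] at h
  simpa [List.filter_map, Function.comp] using h

-- ===== VERDICT (by name: the statement is the Claim_ definition above) =====
theorem find_frequent_letter_and_digit_spec : Claim_equal_find_frequent_letter_and_digit := by
  intro word _
  unfold Spec_find_frequent_letter_and_digit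
  unfold find_frequent_letter_and_digit find_frequent_letter_and_digit_alt
  simp only []
  rw [pv_count_eq]
  set d : PySem.Dict String Int := (PySem.Chars.upper word.toList).foldl (fun d w =>
      if (PySem.Chars.isdigit w || PySem.Chars.isalpha w) then
        d.insert (String.ofList [w]) (d.getD (String.ofList [w]) 0 + 1)
      else d) PySem.Dict.empty with hd
  have hpos : ∀ v ∈ d.values, 1 ≤ v := by
    rw [hd]
    exact pv_values_pos _ _ (by simp [PySem.Dict.values, PySem.Dict.empty])
  have heq : (fun (st : PySem.Dict Int (List String) × Int) (p : String × Int) =>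
      (st.1.modify p.2 [] (fun l => l ++ [p.1]), if p.2 > st.2 then p.2 else st.2))
      = (fun (s : PySem.Dict Int (List String) × Int) (e : String × Int) =>
        ((fun (b : PySem.Dict Int (List String)) (p : String × Int) =>
            b.modify p.2 [] (fun l => l ++ [p.1])) s.1 e,
         (fun (b : Int) (p : String × Int) => if p.2 > b then p.2 else b) s.2 e)) := rfl
  rw [heq, PySem.List.foldl_prod_mk
    (fun (b : PySem.Dict Int (List String)) (p : String × Int) =>
      b.modify p.2 [] (fun l => l ++ [p.1]))
    (fun (b : Int) (p : String × Int) => if p.2 > b then p.2 else b)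
    d.items PySem.Dict.empty 0]
  rw [pv_bucket_eq, pv_best_eq_max]
  have hvals : d.values = d.items.map (fun p => p.2) := rfl
  cases hitems : d.items with
  | nil => simp
  | cons p t =>
    have hp2 : 1 ≤ p.2 := by
      apply hpos
      rw [hvals, hitems]
      simp
    have hmax : PySem.List.max? d.values (fun v => v)
        = some ((t.map (fun p => p.2)).foldl max p.2) := by
      rw [hvals, hitems, List.map_cons]
      exact PySem.List.max?_id_cons _ _
    rw [hmax]
    simp only [List.map_cons, List.foldl_cons]
    have h0 : max (0 : Int) p.2 = p.2 := by omega
    rw [h0]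
    apply congrArg
    apply List.filter_congr
    intro q _
    simp [eq_comm]
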